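-- pv_equiv track=rewrite | github.com/Boilingstars/AntAlgorythm | Core_git_build_0.py | __is_death_circle
-- ===== SOURCE A (Python) =====
-- def __is_death_circle(route:list) -> bool: # Написать код выхода из кругов смерти
--     n = len(route)
--
--     # Проверяем последовательности длиной от 3 до n // 2
--     for length in range(3, n // 2 + 1):
--         for start in range(n - length):
--             # Извлекаем текущую последовательность
--             sequence = route[start:start + length]
--             # Проверяем, есть ли такая же последовательность дальше в массиве
--             for next_start in range(start + length, n - length + 1):
--                 if route[next_start:next_start + length] == sequence:
--                     return True
--
--     return False
-- ===== SOURCE B (Python) =====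
-- def __is_death_circle(route: list) -> bool:
--     # One pass: remember each triple of consecutive values in a set as soon as it
--     # can no longer overlap the triple currently being examined.
--     n = len(route)
--     seen = set()
--     for j in range(3, n - 2):
--         seen.add((route[j - 3], route[j - 2], route[j - 1]))
--         if (route[j], route[j + 1], route[j + 2]) in seen:
--             return True
--     return False
-- ===== Notes on version B (the rewrite author's own statement) =====
-- stated objective: faster
-- what changed: Replaced the quadruple loop over all block lengths and start pairs with a single pass that stores each consecutive triple in a hash set once it can no longer overlap the current position, using the fact that a repeated non-overlapping block of length >= 3 exists iff a repeated non-overlapping triple exists.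
import Mathlib
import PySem

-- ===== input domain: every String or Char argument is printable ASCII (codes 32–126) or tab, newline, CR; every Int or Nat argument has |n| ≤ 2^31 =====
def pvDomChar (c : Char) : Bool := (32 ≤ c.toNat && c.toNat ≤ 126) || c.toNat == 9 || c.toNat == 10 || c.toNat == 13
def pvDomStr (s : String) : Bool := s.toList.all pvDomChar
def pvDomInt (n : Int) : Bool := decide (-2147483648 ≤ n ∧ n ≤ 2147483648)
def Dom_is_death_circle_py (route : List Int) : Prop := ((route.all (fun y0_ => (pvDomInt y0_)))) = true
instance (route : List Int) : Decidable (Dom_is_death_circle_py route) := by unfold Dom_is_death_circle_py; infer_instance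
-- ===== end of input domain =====

-- B replaces A's quadruple scan over all block lengths by a single pass that hashes
-- consecutive triples into a set (a non-overlapping repeated block of length ≥ 3 exists
-- iff a non-overlapping triple repeats); objective: faster.

-- ===== PORT A =====
def is_death_circle_py (route : List Int) : Bool :=
  let n : Int := route.length
  (PySem.List.pyRange 3 (PySem.Int.floordiv n 2 + 1) 1).any (fun length =>
    (PySem.List.pyRange 0 (n - length) 1).any (fun start =>
      let sequence := PySem.List.slice route (some start) (some (start + length))
      (PySem.List.pyRange (start + length) (n - length + 1) 1).any (fun next_start =>
        PySem.List.slice route (some next_start) (some (next_start + length)) == sequence)))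

-- ===== PORT B =====
-- route[j] for an index that is always in range (3 ≤ j ≤ n-3 throughout the loop):
-- pyGetD is exact there (the default is never consulted).
def triAt (route : List Int) (j : Int) : Int × Int × Int :=
  (PySem.List.pyGetD route j 0, PySem.List.pyGetD route (j + 1) 0, PySem.List.pyGetD route (j + 2) 0)

def bLoop (route : List Int) : List Int → PySem.Set (Int × Int × Int) → Bool
  | [], _ => false
  | j :: js, seen =>
    let seen' := PySem.Set.add seen (triAt route (j - 3))
    if PySem.Set.contains seen' (triAt route j) then true else bLoop route js seen'

def is_death_circle_py_alt (route : List Int) : Bool :=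
  let n : Int := route.length
  bLoop route (PySem.List.pyRange 3 (n - 2) 1) PySem.Set.empty

-- ===== PRECONDITION & SPEC =====
def Spec_is_death_circle_py (route : List Int) (out : Bool) : Prop := out = is_death_circle_py_alt route
instance (route : List Int) (out : Bool) : Decidable (Spec_is_death_circle_py route out) := by unfold Spec_is_death_circle_py; infer_instance

-- ===== CLAIM (what is proved, stated in full; the proofs are below) =====
def Claim_equal_is_death_circle_py : Prop := ∀ (route : List Int), Dom_is_death_circle_py route → Spec_is_death_circle_py route (is_death_circle_py route)

-- ===== LEMMAS AND PROOFS =====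

-- The shared characterisation: two equal consecutive triples at distance ≥ 3.
def HasRep (route : List Int) : Prop :=
  ∃ i j : Int, 0 ≤ i ∧ i + 3 ≤ j ∧ j + 3 ≤ (route.length : Int) ∧ triAt route i = triAt route j

-- a length-3 slice written out elementwise
lemma slice3_eq (route : List Int) (i : Int) (h0 : 0 ≤ i) (h3 : i + 3 ≤ (route.length : Int)) :
    PySem.List.slice route (some i) (some (i + 3)) =
      [PySem.List.pyGetD route i 0, PySem.List.pyGetD route (i + 1) 0, PySem.List.pyGetD route (i + 2) 0] := by
  rw [PySem.List.slice_toNat route h0 (by omega)]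
  have hlen : i.toNat + 3 ≤ route.length := by omega
  rw [PySem.List.pyGetD_eq_getElem route 0 h0 (by omega),
      PySem.List.pyGetD_eq_getElem route 0 (by omega) (by omega),
      PySem.List.pyGetD_eq_getElem route 0 (by omega) (by omega)]
  have htn : (i + 3).toNat - i.toNat = 3 := by omega
  rw [htn]
  apply List.ext_getElem
  · simp; omega
  · intro k hk1 hk2
    simp only [List.getElem_take, List.getElem_drop]
    have hk3 : k < 3 := by simp at hk1; omega
    interval_cases k <;> simp <;> congr 1 <;> omega

lemma slice3_eq_iff (route : List Int) (i j : Int) (hi0 : 0 ≤ i) (hi3 : i + 3 ≤ (route.length : Int))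
    (hj0 : 0 ≤ j) (hj3 : j + 3 ≤ (route.length : Int)) :
    (PySem.List.slice route (some i) (some (i + 3)) = PySem.List.slice route (some j) (some (j + 3)))
      ↔ triAt route i = triAt route j := by
  rw [slice3_eq route i hi0 hi3, slice3_eq route j hj0 hj3]
  simp [triAt, Prod.ext_iff]

-- equal long blocks have equal triple prefixes
lemma slice_take3 (route : List Int) (s L : Int) (hs : 0 ≤ s) (hL : 3 ≤ L)
    (_hsl : s + L ≤ (route.length : Int)) :
    PySem.List.slice route (some s) (some (s + 3)) =
      (PySem.List.slice route (some s) (some (s + L))).take 3 := by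
  rw [PySem.List.slice_toNat route hs (by omega), PySem.List.slice_toNat route hs (by omega),
      List.take_take]
  congr 1
  omega

-- A = true  ↔  HasRep
lemma A_iff (route : List Int) : is_death_circle_py route = true ↔ HasRep route := by
  unfold is_death_circle_py
  simp only [List.any_eq_true, PySem.List.mem_pyRange_one, beq_iff_eq]
  constructor
  · rintro ⟨L, ⟨hL3, hLd⟩, s, ⟨hs0, hsn⟩, t, ⟨hst, htn⟩, heq⟩
    refine ⟨s, t, hs0, by omega, by omega, ?_⟩
    rw [← slice3_eq_iff route s t hs0 (by omega) (by omega) (by omega)]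
    rw [slice_take3 route s L hs0 hL3 (by omega), slice_take3 route t L (by omega) hL3 (by omega), heq]
  · rintro ⟨i, j, hi0, hij, hjn, heq⟩
    have hn6 : (6 : Int) ≤ (route.length : Int) := by omega
    refine ⟨3, ⟨le_refl _, ?_⟩, i, ⟨hi0, by omega⟩, j, ⟨by omega, by omega⟩, ?_⟩
    · have := (PySem.Int.le_floordiv_iff_mul_le (a := (route.length : Int)) (b := 2) (q := 3) (by omega)).mpr (by omega)
      omega
    · rw [slice3_eq_iff route j i (by omega) (by omega) hi0 (by omega)]
      exact heq.symm

-- the loop of B, characterised over an arbitrary tail range and accumulated set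
lemma bLoop_iff (route : List Int) (b : Int) (k : Nat) : ∀ (a : Int), b - a ≤ (k : Int) →
    ∀ (seen : PySem.Set (Int × Int × Int)),
    (bLoop route (PySem.List.pyRange a b 1) seen = true ↔
      ∃ j : Int, a ≤ j ∧ j < b ∧ (triAt route j ∈ seen ∨
        ∃ i : Int, a - 3 ≤ i ∧ i ≤ j - 3 ∧ triAt route i = triAt route j)) := by
  induction k with
  | zero =>
    intro a ha seen
    rw [PySem.List.pyRange_one_eq_nil (by omega)]
    simp only [bLoop]
    constructor
    · intro h; exact absurd h (by simp)
    · rintro ⟨j, h1, h2, _⟩; omega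
  | succ k ih =>
    intro a ha seen
    by_cases hab : a < b
    · rw [PySem.List.pyRange_one_cons hab]
      simp only [bLoop]
      split_ifs with hc
      · simp only [true_iff]
        rw [PySem.Set.contains_iff, PySem.Set.mem_add] at hc
        rcases hc with hmem | heq
        · exact ⟨a, le_refl _, hab, Or.inl hmem⟩
        · exact ⟨a, le_refl _, hab, Or.inr ⟨a - 3, by omega, by omega, heq.symm⟩⟩
      · rw [PySem.Set.contains_iff, PySem.Set.mem_add] at hc
        push Not at hc
        rw [ih (a + 1) (by omega) _]
        constructor
        · rintro ⟨j, hj1, hj2, hj3 | ⟨i, hi1, hi2, hi3⟩⟩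
          · rw [PySem.Set.mem_add] at hj3
            rcases hj3 with h | h
            · exact ⟨j, by omega, hj2, Or.inl h⟩
            · exact ⟨j, by omega, hj2, Or.inr ⟨a - 3, by omega, by omega, h.symm⟩⟩
          · exact ⟨j, by omega, hj2, Or.inr ⟨i, by omega, hi2, hi3⟩⟩
        · rintro ⟨j, hj1, hj2, hj3 | ⟨i, hi1, hi2, hi3⟩⟩
          · rcases eq_or_lt_of_le hj1 with rfl | hlt
            · exact absurd hj3 hc.1
            · exact ⟨j, by omega, hj2, Or.inl (by rw [PySem.Set.mem_add]; exact Or.inl hj3)⟩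
          · rcases eq_or_lt_of_le hj1 with rfl | hlt
            · have : i = a - 3 := by omega
              subst this
              exact absurd hi3.symm hc.2
            · by_cases hia : i = a - 3
              · subst hia
                exact ⟨j, by omega, hj2, Or.inl (by rw [PySem.Set.mem_add]; exact Or.inr hi3.symm)⟩
              · exact ⟨j, by omega, hj2, Or.inr ⟨i, by omega, hi2, hi3⟩⟩
    · rw [PySem.List.pyRange_one_eq_nil (by omega)]
      simp only [bLoop]
      constructor
      · intro h; exact absurd h (by simp)
      · rintro ⟨j, h1, h2, _⟩; omega

-- B = true  ↔  HasRep
lemma B_iff (route : List Int) : is_death_circle_py_alt route = true ↔ HasRep route := by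
  unfold is_death_circle_py_alt
  set n : Int := (route.length : Int) with hn
  rw [bLoop_iff route (n - 2) (n - 2 - 3).toNat 3 (by omega) PySem.Set.empty]
  constructor
  · rintro ⟨j, hj1, hj2, hmem | ⟨i, hi1, hi2, hi3⟩⟩
    · exact absurd hmem (by simp [PySem.Set.empty])
    · exact ⟨i, j, by omega, by omega, by omega, hi3⟩
  · rintro ⟨i, j, hi0, hij, hjn, heq⟩
    exact ⟨j, by omega, by omega, Or.inr ⟨i, by omega, by omega, heq⟩⟩

-- ===== VERDICT (by name: the statement is the Claim_ definition above) =====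
theorem is_death_circle_py_spec : Claim_equal_is_death_circle_py := by
  intro route _
  unfold Spec_is_death_circle_py
  have hA := A_iff route
  have hB := B_iff route
  cases hA' : is_death_circle_py route <;> cases hB' : is_death_circle_py_alt route <;>
    simp_all
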